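-- pv_equiv track=rewrite | github.com/silvcr/AIProjectB | smarter_player/N_B/evaluation.py | centreBlocks
-- ===== SOURCE A (Python) =====
-- def centreBlocks(n,placedBlocks):
--     """ Gives how many centre blocks a colour has  """
--     blocks = 0
--
--     # if n is odd
--     if n % 2 > 0:
--         min = int(round(n/2)-1)
--         max = int(round(n/2))+2
--
--     # if n is even
--     else:
--         min = int(n/2)-1
--         max = int(n/2)+1
--
--     for tile in placedBlocks:
--         if tile[0] in range(min,max) and tile[1] in range(min,max):
--             blocks+=1
--
--     return blocks
-- ===== SOURCE B (Python) =====
-- def centreBlocks(n, placedBlocks):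
--     """ Gives how many centre blocks a colour has """
--     # same parity branches for the centre-region bounds as the original
--     if n % 2 > 0:
--         lo = int(round(n/2)-1)
--         hi = int(round(n/2))+2
--     else:
--         lo = int(n/2)-1
--         hi = int(n/2)+1
--     blocks = 0
--     # sweep the fixed centre region cell by cell and count matching tiles
--     for x in range(lo, hi):
--         for y in range(lo, hi):
--             blocks += sum(1 for t in placedBlocks if t[0] == x and t[1] == y)
--     return blocks
-- ===== Notes on version B (the rewrite author's own statement) =====
-- stated objective: alternative
-- what changed: Instead of one pass over placedBlocks with a range-membership test per tile, B enumerates every cell (x,y) of the fixed 2x2/3x3 centre region and adds the number of tiles whose first two coordinates equal that cell.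
import Mathlib
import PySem

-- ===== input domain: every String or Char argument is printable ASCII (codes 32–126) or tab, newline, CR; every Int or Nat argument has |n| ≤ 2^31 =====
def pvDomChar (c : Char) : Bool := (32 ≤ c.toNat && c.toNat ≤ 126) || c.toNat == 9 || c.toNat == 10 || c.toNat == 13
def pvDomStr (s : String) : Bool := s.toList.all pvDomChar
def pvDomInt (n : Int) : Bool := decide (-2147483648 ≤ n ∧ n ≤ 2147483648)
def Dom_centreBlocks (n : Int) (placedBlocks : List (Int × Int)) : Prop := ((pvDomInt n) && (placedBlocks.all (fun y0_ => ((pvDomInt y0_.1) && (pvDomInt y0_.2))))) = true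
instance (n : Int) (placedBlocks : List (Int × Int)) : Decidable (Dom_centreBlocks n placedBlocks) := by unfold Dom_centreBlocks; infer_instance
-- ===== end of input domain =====

-- B sweeps the fixed centre region cell by cell, counting tiles equal to each cell,
-- instead of A's single pass testing each tile for membership in the region (objective: alternative).


-- ===== PORT A =====
-- bounds of the centre region, shared by both Pythons verbatim.
-- For odd n, Python's round(n/2) rounds n//2 + 0.5 half-to-even (exact here since |n| ≤ 2^31
-- is exact in a float): it is n//2 when n//2 is even, else n//2 + 1.  For even n, int(n/2) = n//2.
def centreBounds (n : Int) : Int × Int :=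
  if PySem.Int.mod n 2 > 0 then
    let t := PySem.Int.floordiv n 2
    let r := if t % 2 = 0 then t else t + 1
    (r - 1, r + 2)
  else
    (PySem.Int.floordiv n 2 - 1, PySem.Int.floordiv n 2 + 1)

def centreBlocks (n : Int) (placedBlocks : List (Int × Int)) : Int :=
  let mn : Int := (centreBounds n).1
  let mx : Int := (centreBounds n).2
  placedBlocks.foldl
    (fun blocks tile =>
      if (mn ≤ tile.1 ∧ tile.1 < mx) ∧ (mn ≤ tile.2 ∧ tile.2 < mx) then blocks + 1 else blocks)
    0

-- ===== PORT B =====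
def centreBlocks_alt (n : Int) (placedBlocks : List (Int × Int)) : Int :=
  let mn := (centreBounds n).1
  let mx := (centreBounds n).2
  (PySem.List.pyRange mn mx 1).foldl
    (fun blocks x =>
      (PySem.List.pyRange mn mx 1).foldl
        (fun blocks y =>
          blocks + placedBlocks.foldl (fun s t => if t.1 = x ∧ t.2 = y then s + 1 else s) 0)
        blocks)
    0

-- ===== PRECONDITION & SPEC =====
def Spec_centreBlocks (n : Int) (placedBlocks : List (Int × Int)) (out : Int) : Prop := out = centreBlocks_alt n placedBlocks
instance (n : Int) (placedBlocks : List (Int × Int)) (out : Int) : Decidable (Spec_centreBlocks n placedBlocks out) := by unfold Spec_centreBlocks; infer_instance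

-- ===== CLAIM (what is proved, stated in full; the proofs are below) =====
def Claim_equal_centreBlocks : Prop := ∀ (n : Int) (placedBlocks : List (Int × Int)), Dom_centreBlocks n placedBlocks → Spec_centreBlocks n placedBlocks (centreBlocks n placedBlocks)

-- ===== LEMMAS AND PROOFS =====

-- summing an indicator over a duplicate-free list picks out membership
theorem pv_sum_ind (l : List Int) (hl : l.Nodup) (a c : Int) :
    (l.map (fun y => if a = y then c else 0)).sum = if a ∈ l then c else 0 := by
  induction l with
  | nil => simp
  | cons h t ih =>
    rcases List.nodup_cons.mp hl with ⟨hh, ht⟩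
    by_cases hah : a = h
    · subst hah
      have h0 : (t.map (fun y => if a = y then c else 0)).sum = 0 := by
        rw [ih ht, if_neg hh]
      simp [h0]
    · simp only [List.map_cons, List.sum_cons, if_neg hah, ih ht, List.mem_cons, zero_add]
      by_cases hat : a ∈ t <;> simp [hat, hah]

-- the inner sum over one row of the region, for a fixed tile
theorem pv_row (mn mx x : Int) (t : Int × Int) :
    ((PySem.List.pyRange mn mx 1).map (fun y => if t.1 = x ∧ t.2 = y then (1 : Int) else 0)).sum
      = if t.1 = x ∧ (mn ≤ t.2 ∧ t.2 < mx) then 1 else 0 := by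
  by_cases hx : t.1 = x
  · have he : (fun y => if t.1 = x ∧ t.2 = y then (1 : Int) else 0)
        = (fun y => if t.2 = y then (1 : Int) else 0) := by
      funext y; simp [hx]
    rw [he, pv_sum_ind _ (PySem.List.nodup_pyRange_one mn mx) t.2 1]
    simp [PySem.List.mem_pyRange_one, hx]
  · simp [hx]

-- the double sum of a tile's per-cell indicator over the region is its region-membership indicator
theorem pv_cell (mn mx : Int) (t : Int × Int) :
    ((PySem.List.pyRange mn mx 1).map (fun x =>
        ((PySem.List.pyRange mn mx 1).map (fun y =>
          if t.1 = x ∧ t.2 = y then (1 : Int) else 0)).sum)).sum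
      = if (mn ≤ t.1 ∧ t.1 < mx) ∧ (mn ≤ t.2 ∧ t.2 < mx) then 1 else 0 := by
  have h1 : (fun x => ((PySem.List.pyRange mn mx 1).map (fun y =>
        if t.1 = x ∧ t.2 = y then (1 : Int) else 0)).sum)
      = (fun x => if t.1 = x then (if mn ≤ t.2 ∧ t.2 < mx then (1 : Int) else 0) else 0) := by
    funext x
    rw [pv_row mn mx x t]
    by_cases hx : t.1 = x <;> simp [hx]
  rw [h1, pv_sum_ind _ (PySem.List.nodup_pyRange_one mn mx) t.1 _]
  by_cases h2 : mn ≤ t.1 ∧ t.1 < mx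
  · simp [PySem.List.mem_pyRange_one, h2]
  · simp [PySem.List.mem_pyRange_one, h2]

-- exchanging the two summation orders: cells-then-tiles equals tiles-then-region-test
theorem pv_swap (mn mx : Int) (ts : List (Int × Int)) :
    ((PySem.List.pyRange mn mx 1).map (fun x =>
        ((PySem.List.pyRange mn mx 1).map (fun y =>
          (ts.countP (fun t => decide (t.1 = x ∧ t.2 = y)) : Int))).sum)).sum
      = (ts.countP (fun t =>
          decide ((mn ≤ t.1 ∧ t.1 < mx) ∧ (mn ≤ t.2 ∧ t.2 < mx))) : Int) := by
  induction ts with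
  | nil => simp
  | cons t ts ih =>
    have hc : ∀ (p : (Int × Int) → Prop) [DecidablePred p],
        ((List.countP (fun u => decide (p u)) (t :: ts) : Int))
          = (if p t then (1 : Int) else 0) + (List.countP (fun u => decide (p u)) ts : Int) := by
      intro p _
      rw [List.countP_cons]
      by_cases hp : p t <;> simp [hp]
      omega
    have hrow : ∀ x : Int,
        ((PySem.List.pyRange mn mx 1).map (fun y =>
            (List.countP (fun u => decide (u.1 = x ∧ u.2 = y)) (t :: ts) : Int))).sum
          = ((PySem.List.pyRange mn mx 1).map (fun y =>
              if t.1 = x ∧ t.2 = y then (1 : Int) else 0)).sum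
            + ((PySem.List.pyRange mn mx 1).map (fun y =>
              (List.countP (fun u => decide (u.1 = x ∧ u.2 = y)) ts : Int))).sum := by
      intro x
      rw [List.map_congr_left (fun y _ => hc (fun u => u.1 = x ∧ u.2 = y)),
          PySem.List.sum_map_add_int]
    rw [List.map_congr_left (fun x _ => hrow x), PySem.List.sum_map_add_int, ih,
        pv_cell mn mx t, hc (fun u => (mn ≤ u.1 ∧ u.1 < mx) ∧ (mn ≤ u.2 ∧ u.2 < mx))]

-- both ports, for arbitrary bounds, as a function of the tile list
theorem pv_main (mn mx : Int) (ts : List (Int × Int)) :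
    (PySem.List.pyRange mn mx 1).foldl
      (fun blocks x =>
        (PySem.List.pyRange mn mx 1).foldl
          (fun blocks y => blocks + ts.foldl (fun s t => if t.1 = x ∧ t.2 = y then s + 1 else s) 0)
          blocks)
      0
    = ts.foldl
        (fun (blocks : Int) tile =>
          if (mn ≤ tile.1 ∧ tile.1 < mx) ∧ (mn ≤ tile.2 ∧ tile.2 < mx) then blocks + 1 else blocks)
        0 := by
  have hinner : ∀ (blocks x : Int),
      (PySem.List.pyRange mn mx 1).foldl
          (fun blocks y => blocks + ts.foldl (fun s t => if t.1 = x ∧ t.2 = y then s + 1 else s) 0)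
          blocks
        = blocks + ((PySem.List.pyRange mn mx 1).map (fun y =>
            (ts.countP (fun t => decide (t.1 = x ∧ t.2 = y)) : Int))).sum := by
    intro blocks x
    have he : (fun (blocks y : Int) =>
          blocks + ts.foldl (fun s t => if t.1 = x ∧ t.2 = y then s + 1 else s) 0)
        = (fun blocks y => blocks + (ts.countP (fun t => decide (t.1 = x ∧ t.2 = y)) : Int)) := by
      funext blocks y
      rw [PySem.List.foldl_ite_add_one (fun t => t.1 = x ∧ t.2 = y) ts 0, zero_add]
    rw [he, PySem.List.foldl_add]
  have hfun : (fun (blocks x : Int) =>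
        (PySem.List.pyRange mn mx 1).foldl
          (fun blocks y => blocks + ts.foldl (fun s t => if t.1 = x ∧ t.2 = y then s + 1 else s) 0)
          blocks)
      = (fun blocks x => blocks + ((PySem.List.pyRange mn mx 1).map (fun y =>
          (ts.countP (fun t => decide (t.1 = x ∧ t.2 = y)) : Int))).sum) := by
    funext blocks x; exact hinner blocks x
  have e1 : (PySem.List.pyRange mn mx 1).foldl
      (fun blocks x =>
        (PySem.List.pyRange mn mx 1).foldl
          (fun blocks y => blocks + ts.foldl (fun s t => if t.1 = x ∧ t.2 = y then s + 1 else s) 0)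
          blocks)
      0
    = (PySem.List.pyRange mn mx 1).foldl
        (fun blocks x => blocks + ((PySem.List.pyRange mn mx 1).map (fun y =>
            (ts.countP (fun t => decide (t.1 = x ∧ t.2 = y)) : Int))).sum) 0 :=
    congrArg (fun f => List.foldl f (0 : Int) (PySem.List.pyRange mn mx 1)) hfun
  refine e1.trans ?_
  rw [PySem.List.foldl_add, zero_add, pv_swap mn mx ts,
      PySem.List.foldl_ite_add_one
        (fun tile => (mn ≤ tile.1 ∧ tile.1 < mx) ∧ (mn ≤ tile.2 ∧ tile.2 < mx)) ts 0,
      zero_add]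

-- ===== VERDICT (by name: the statement is the Claim_ definition above) =====
theorem centreBlocks_spec : Claim_equal_centreBlocks := by
  intro n placedBlocks _
  show centreBlocks n placedBlocks = centreBlocks_alt n placedBlocks
  simp only [centreBlocks, centreBlocks_alt]
  exact (pv_main (centreBounds n).1 (centreBounds n).2 placedBlocks).symm
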